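-- pv_equiv track=rewrite | github.com/PigletHong/CodingTest | 프로그래머스/lv2/42626. 더 맵게/더 맵게.py | solution
-- ===== SOURCE A (Python) =====
-- import heapq
--
-- def solution(scoville, K):
--     heapq.heapify(scoville)
--     cnt = 0
--     if scoville[0] >= K:
--         return 0
--     while scoville[0] < K and len(scoville) > 1:
--         first = heapq.heappop(scoville)
--         second = heapq.heappop(scoville)
--         new = first + (second * 2)
--         heapq.heappush(scoville, new)
--         cnt += 1
--
--     if len(scoville) == 1 and scoville[0] < K:
--         return -1
--     else:
--         return cnt
-- ===== SOURCE B (Python) =====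
-- def solution(scoville, K):
--     # No heap: repeatedly scan for the two smallest values with min() and
--     # remove them by first occurrence.  Mutates scoville like A does (though
--     # the leftover contents/order differ); the return value is the same.
--     cnt = 0
--     while min(scoville) < K:
--         if len(scoville) == 1:
--             return -1
--         a = min(scoville)
--         scoville.remove(a)
--         b = min(scoville)
--         scoville.remove(b)
--         scoville.append(a + 2 * b)
--         cnt += 1
--     return cnt
-- ===== Notes on version B (the rewrite author's own statement) =====
-- stated objective: simpler
-- what changed: B drops heapq entirely: instead of maintaining a binary heap it repeatedly scans the plain list with min() and removes the two smallest by first occurrence, folding A's post-loop -1 check into the loop.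
-- outside the precondition, e.g. on solution([], 7): A raises IndexError, B raises ValueError
import Mathlib
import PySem

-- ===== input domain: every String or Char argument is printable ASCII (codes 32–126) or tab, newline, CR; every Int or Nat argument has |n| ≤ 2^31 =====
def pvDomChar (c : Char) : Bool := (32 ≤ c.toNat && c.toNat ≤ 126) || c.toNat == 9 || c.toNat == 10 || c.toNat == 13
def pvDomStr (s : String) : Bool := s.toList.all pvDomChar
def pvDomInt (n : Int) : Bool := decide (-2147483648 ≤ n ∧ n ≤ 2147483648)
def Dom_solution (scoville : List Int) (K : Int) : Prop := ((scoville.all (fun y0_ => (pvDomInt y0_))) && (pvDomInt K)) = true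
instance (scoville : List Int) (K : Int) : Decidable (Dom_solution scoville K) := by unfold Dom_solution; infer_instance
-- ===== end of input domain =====

-- B drops the heap entirely: it repeatedly scans for the two smallest values with min()
-- and removes them by first occurrence — simpler, no heapq (objective: simpler, not faster).
-- Both A and B mutate the scoville list in Python (A heapifies/pops it, B removes/appends);
-- the leftover contents differ, so the equivalence proved here is about the RETURN value only.

-- ===== PORT A =====
-- heapq is the standard library; it is ported by its priority-queue contract: the backing
-- list is kept in ascending order (heapify = sort, heappop = take the least element,
-- heappush = ordered insert).  A reads the list only through heapq and scoville[0] (= the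
-- least element), so this is exact for the returned value.
def heapifyA (l : List Int) : List Int := l.mergeSort (fun a b => a ≤ b)

-- while scoville[0] < K and len(scoville) > 1: pop two, push first + second*2, cnt += 1
def loopA (K : Int) (h : List Int) (cnt : Int) : List Int × Int :=
  match h with
  | a :: b :: rest =>
    if a < K then
      loopA K (List.orderedInsert (· ≤ ·) (a + b * 2) rest) (cnt + 1)
    else (h, cnt)
  | _ => (h, cnt)
termination_by h.length
decreasing_by
  simpa [(List.perm_orderedInsert (· ≤ ·) (a + b * 2) rest).length_eq] using
    Nat.lt_succ_of_lt (Nat.lt_succ_self _)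

def solution (scoville : List Int) (K : Int) : Int :=
  let h := heapifyA scoville
  match h with
  | [] => 0  -- scoville[0] raises IndexError in Python on the empty list; excluded by Pre_
  | a :: _ =>
    if a ≥ K then 0
    else
      let p := loopA K h 0
      -- if len(scoville) == 1 and scoville[0] < K: return -1 else: return cnt
      match p.1 with
      | [x] => if x < K then -1 else p.2
      | _ => p.2

-- ===== PORT B =====
-- while min(scoville) < K: if len == 1 return -1; remove the two smallest, append a + 2*b
def loopB (K : Int) (xs : List Int) (cnt : Int) : Int :=
  match h1 : PySem.List.min? xs (fun y => y) with
  | none => cnt  -- unreachable: xs stays nonempty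
  | some a =>
    if a < K then
      if xs.length = 1 then -1
      else
        match h2 : PySem.List.remove? xs a with
        | none => cnt  -- unreachable: a ∈ xs
        | some xs1 =>
          match h3 : PySem.List.min? xs1 (fun y => y) with
          | none => cnt  -- unreachable: xs1 nonempty
          | some b =>
            match h4 : PySem.List.remove? xs1 b with
            | none => cnt  -- unreachable: b ∈ xs1
            | some xs2 => loopB K (xs2 ++ [a + 2 * b]) (cnt + 1)
    else cnt
termination_by xs.length
decreasing_by
  have ha := PySem.List.min?_mem h1
  have hb := PySem.List.min?_mem h3
  have e2 : xs1 = xs.erase a := by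
    have := PySem.List.remove?_eq_some_erase xs a ha; rw [h2] at this; exact Option.some.inj this
  have e4 : xs2 = xs1.erase b := by
    have := PySem.List.remove?_eq_some_erase xs1 b hb; rw [h4] at this; exact Option.some.inj this
  have l1 : xs1.length = xs.length - 1 := by rw [e2]; exact List.length_erase_of_mem ha
  have l2 : xs2.length = xs1.length - 1 := by rw [e4]; exact List.length_erase_of_mem hb
  have hlen : 2 ≤ xs.length := by
    have hmem : a ∈ xs := ha
    rcases xs with _ | ⟨x, _ | ⟨y, t⟩⟩ <;> simp_all
  simp only [List.length_append, List.length_singleton]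
  omega

def solution_alt (scoville : List Int) (K : Int) : Int := loopB K scoville 0

-- ===== PRECONDITION & SPEC =====
-- A evaluates scoville[0] on the empty list and raises IndexError there; Pre_ excludes it.
def Pre_solution (scoville : List Int) (K : Int) : Prop := scoville ≠ []
instance (scoville : List Int) (K : Int) : Decidable (Pre_solution scoville K) := by
  unfold Pre_solution; infer_instance
def pvWitness_solution : List Int × Int := ([1, 2, 3, 9, 10, 12], 7)

def Spec_solution (scoville : List Int) (K : Int) (out : Int) : Prop := out = solution_alt scoville K
instance (scoville : List Int) (K : Int) (out : Int) : Decidable (Spec_solution scoville K out) := by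
  unfold Spec_solution; infer_instance

-- ===== CLAIM (what is proved, stated in full; the proofs are below) =====
def Claim_equal_solution : Prop := ∀ (scoville : List Int) (K : Int), Dom_solution scoville K → Pre_solution scoville K → Spec_solution scoville K (solution scoville K)

-- ===== LEMMAS AND PROOFS =====

-- A's post-loop check, as `solution` performs it on the loop's result.
def afterA (K : Int) (p : List Int × Int) : Int :=
  match p.1 with
  | [x] => if x < K then -1 else p.2
  | _ => p.2

-- Unfolding lemmas for loopB's guarded matches.
theorem loopB_stop (K : Int) (xs : List Int) (cnt : Int) (a : Int)
    (hmin : PySem.List.min? xs (fun y => y) = some a) (hk : ¬ a < K) :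
    loopB K xs cnt = cnt := by
  rw [loopB]; split
  · rfl
  · rename_i a' h'
    rw [hmin] at h'
    cases h'
    rw [if_neg hk]

theorem loopB_one (K : Int) (xs : List Int) (cnt : Int) (a : Int)
    (hmin : PySem.List.min? xs (fun y => y) = some a) (hk : a < K)
    (hlen : xs.length = 1) :
    loopB K xs cnt = -1 := by
  rw [loopB]; split
  · rename_i h'; rw [hmin] at h'; cases h'
  · rename_i a' h'
    rw [hmin] at h'
    cases h'
    rw [if_pos hk, if_pos hlen]

theorem loopB_step (K : Int) (xs : List Int) (cnt : Int) (a b : Int)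
    (hmin : PySem.List.min? xs (fun y => y) = some a) (hk : a < K)
    (hlen : xs.length ≠ 1) (hmem : a ∈ xs)
    (hmin2 : PySem.List.min? (xs.erase a) (fun y => y) = some b)
    (hmem2 : b ∈ xs.erase a) :
    loopB K xs cnt = loopB K (((xs.erase a).erase b) ++ [a + 2 * b]) (cnt + 1) := by
  rw [loopB]; split
  · rename_i h'; rw [hmin] at h'; cases h'
  · rename_i a' h'
    rw [hmin] at h'; cases h'
    rw [if_pos hk, if_neg hlen]
    split
    · rename_i h2; rw [PySem.List.remove?_eq_some_erase xs a hmem] at h2; cases h2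
    · rename_i xs1 h2
      rw [PySem.List.remove?_eq_some_erase xs a hmem] at h2; cases h2
      split
      · rename_i h3; rw [hmin2] at h3; cases h3
      · rename_i b' h3
        rw [hmin2] at h3; cases h3
        split
        · rename_i h4; rw [PySem.List.remove?_eq_some_erase _ b hmem2] at h4; cases h4
        · rename_i xs2 h4
          rw [PySem.List.remove?_eq_some_erase _ b hmem2] at h4; cases h4
          rfl

-- min? of any permutation of a sorted nonempty list is its head (as a value).
theorem min?_of_perm_sorted {a : Int} {t xs : List Int}
    (hs : List.Sorted (· ≤ ·) (a :: t)) (hp : (a :: t).Perm xs) :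
    PySem.List.min? xs (fun y => y) = some a := by
  cases h : PySem.List.min? xs (fun y => y) with
  | none =>
    rw [PySem.List.min?_eq_none_iff] at h
    subst h; exact absurd hp.length_eq (by simp)
  | some m =>
    have hmem : m ∈ xs := PySem.List.min?_mem h
    have hmin : ∀ y ∈ xs, m ≤ y := by
      intro y hy; exact PySem.List.min?_isMin h y hy
    have hma : m ≤ a := hmin a (hp.mem_iff.mp (by simp))
    have ham : a ≤ m := by
      have := hp.mem_iff.mpr hmem
      rcases List.mem_cons.mp this with rfl | hmt
      · exact le_refl _
      · exact List.rel_of_sorted_cons hs hmt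
    rw [le_antisymm hma ham]

theorem loop_eq (K : Int) : ∀ (n : Nat) (h xs : List Int) (cnt : Int),
    h.length = n → List.Sorted (· ≤ ·) h → h.Perm xs → h ≠ [] →
    afterA K (loopA K h cnt) = loopB K xs cnt := by
  intro n
  induction n using Nat.strong_induction_on with
  | _ n ih =>
    intro h xs cnt hlen hs hp hne
    match h with
    | [] => exact absurd rfl hne
    | [a] =>
      have hmin : PySem.List.min? xs (fun y => y) = some a := min?_of_perm_sorted hs hp
      have hxs : xs.length = 1 := by simpa using hp.length_eq.symm
      by_cases hk : a < K
      · rw [loopB_one K xs cnt a hmin hk hxs]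
        simp [loopA, afterA, hk]
      · rw [loopB_stop K xs cnt a hmin hk]
        simp [loopA, afterA, hk]
    | a :: b :: rest =>
      have hmin : PySem.List.min? xs (fun y => y) = some a := min?_of_perm_sorted hs hp
      by_cases hk : a < K
      · -- one mixing step on both sides
        have hxslen : xs.length = rest.length + 2 := by simpa using hp.length_eq.symm
        have ha_mem : a ∈ xs := hp.mem_iff.mp (by simp)
        have herase : (b :: rest).Perm (xs.erase a) := by
          have := hp.erase a
          simpa using this
        have hb_min : PySem.List.min? (xs.erase a) (fun y => y) = some b :=
          min?_of_perm_sorted hs.tail herase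
        have hb_mem : b ∈ xs.erase a := herase.mem_iff.mp (by simp)
        have herase2 : rest.Perm ((xs.erase a).erase b) := by
          have := herase.erase b
          simpa using this
        rw [loopB_step K xs cnt a b hmin hk (by omega) ha_mem hb_min hb_mem]
        rw [loopA, if_pos hk]
        have hperm' : (List.orderedInsert (· ≤ ·) (a + b * 2) rest).Perm
            (((xs.erase a).erase b) ++ [a + 2 * b]) := by
          have h1 := List.perm_orderedInsert (· ≤ ·) (a + b * 2) rest
          have h2 : (((xs.erase a).erase b) ++ [a + 2 * b]).Perm ((a + b * 2) :: rest) := by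
            have h3 : (((xs.erase a).erase b) ++ [a + 2 * b]).Perm
                ((a + 2 * b) :: (xs.erase a).erase b) :=
              List.perm_append_singleton _ _
            refine h3.trans ?_
            have h4 : (a + 2 * b) = (a + b * 2) := by ring
            rw [h4]
            exact (herase2.symm).cons _
          exact h1.trans h2.symm
        have hsorted' : List.Sorted (· ≤ ·) (List.orderedInsert (· ≤ ·) (a + b * 2) rest) :=
          List.Sorted.orderedInsert _ _ (hs.tail.tail)
        have hne' : List.orderedInsert (· ≤ ·) (a + b * 2) rest ≠ [] := by
          intro hc
          have hl := (List.perm_orderedInsert (· ≤ ·) (a + b * 2) rest).length_eq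
          rw [hc] at hl; simp at hl
        have hlt : (List.orderedInsert (· ≤ ·) (a + b * 2) rest).length < n := by
          have hl := (List.perm_orderedInsert (· ≤ ·) (a + b * 2) rest).length_eq
          have hn : rest.length + 2 = n := by simpa using hlen
          simp at hl; omega
        exact ih _ hlt _ _ (cnt + 1) rfl hsorted' hperm' hne'
      · rw [loopB_stop K xs cnt a hmin hk]
        rw [loopA, if_neg hk]
        simp [afterA]

theorem solution_eq_alt (scoville : List Int) (K : Int) (hne : scoville ≠ []) :
    solution scoville K = solution_alt scoville K := by
  have hperm : (heapifyA scoville).Perm scoville := List.mergeSort_perm scoville _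
  have hsorted : List.Sorted (· ≤ ·) (heapifyA scoville) := by
    have := List.sorted_mergeSort (le := fun a b : Int => decide (a ≤ b))
      (fun a b c => by simp; exact le_trans) (fun a b => by simp; exact le_total a b) scoville
    simpa [heapifyA, List.Sorted] using this
  have hne' : heapifyA scoville ≠ [] := by
    intro hc
    have hl := hperm.length_eq; rw [hc] at hl
    exact hne (List.eq_nil_of_length_eq_zero hl.symm)
  rcases hh : heapifyA scoville with _ | ⟨a, t⟩
  · exact absurd hh hne'
  · rw [hh] at hperm hsorted
    have hmin : PySem.List.min? scoville (fun y => y) = some a :=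
      min?_of_perm_sorted hsorted hperm
    show (match heapifyA scoville with
      | [] => (0 : Int)
      | a :: _ =>
        if a ≥ K then 0
        else
          let p := loopA K (heapifyA scoville) 0
          match p.1 with
          | [x] => if x < K then -1 else p.2
          | _ => p.2) = solution_alt scoville K
    rw [hh]
    by_cases hk : a ≥ K
    · simp only [hk, if_true]
      exact (loopB_stop K scoville 0 a hmin (by omega)).symm
    · simp only [hk, if_false]
      have hmain := loop_eq K (a :: t).length (a :: t) scoville 0 rfl hsorted hperm (by simp)
      simpa [afterA, solution_alt] using hmain

-- ===== VERDICT (by name: the statement is the Claim_ definition above) =====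
theorem solution_spec : Claim_equal_solution := by
  intro scoville K _ hpre
  unfold Spec_solution
  exact solution_eq_alt scoville K hpre
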